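-- pv_equiv track=rewrite | github.com/Subhajit-git07/Leetcode | leetcode_practice5.py | commonChar
-- ===== SOURCE A (Python) =====
-- def commonChar(words):
--     charDict = {}
--     for char in words[0]:
--         if char in charDict:
--             charDict[char] += 1
--         else:
--             charDict[char] = 1
--
--     for i in range(1, len(words)):
--         for key in charDict:
--             charDict[key] = min(charDict[key], words[i].count(key))
--     res = []
--     for char in charDict:
--         res += [char]*charDict[char]
--     return res
-- ===== SOURCE B (Python) =====
-- def commonChar(words):
--     res = []
--     seen = set()
--     for ch in words[0]:
--         if ch not in seen:
--             seen.add(ch)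
--             res += [ch] * min(w.count(ch) for w in words)
--     return res
-- ===== Notes on version B (the rewrite author's own statement) =====
-- stated objective: simpler
-- what changed: Replaces the dict-of-counts built and repeatedly re-minimized over all other words plus a final dict-output pass by a single scan of words[0] with a seen-set that, at each first occurrence of a character, directly emits it min(w.count(ch) for w in words) times.
import Mathlib
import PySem

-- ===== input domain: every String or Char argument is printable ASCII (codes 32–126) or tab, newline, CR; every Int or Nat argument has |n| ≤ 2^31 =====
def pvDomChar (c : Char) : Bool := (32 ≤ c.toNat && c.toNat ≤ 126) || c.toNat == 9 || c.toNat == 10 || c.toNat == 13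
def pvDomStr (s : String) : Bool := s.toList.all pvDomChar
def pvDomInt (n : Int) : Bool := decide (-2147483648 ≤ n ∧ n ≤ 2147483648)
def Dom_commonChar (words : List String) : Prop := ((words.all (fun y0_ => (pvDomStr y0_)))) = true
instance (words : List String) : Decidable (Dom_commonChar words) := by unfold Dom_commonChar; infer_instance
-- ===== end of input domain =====

-- B is a simpler re-implementation: one scan of words[0] with a seen-set, emitting each
-- first-seen character min(w.count(ch) for w in words) times; no dict, no re-minimization passes.

-- ===== PORT A =====
def commonChar (words : List String) : List String :=
  let w0 := PySem.List.pyGetD words 0 ""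
  let d1 : PySem.Dict Char Int :=
    w0.toList.foldl (fun d c => if d.contains c then d.insert c (d.getD c 0 + 1) else d.insert c 1)
      PySem.Dict.empty
  let d2 :=
    (PySem.List.pyRange 1 (PySem.List.len words)).foldl (fun d i =>
      d.keys.foldl (fun (d' : PySem.Dict Char Int) k =>
        d'.insert k (min (d'.getD k 0) ((PySem.Str.count (PySem.List.pyGetD words i "") (String.ofList [k]) : Int)))) d) d1
  d2.keys.foldl (fun res k => res ++ List.replicate (d2.getD k 0).toNat (String.ofList [k])) []

-- ===== PORT B =====
def commonChar_alt (words : List String) : List String :=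
  let w0 := PySem.List.pyGetD words 0 ""
  (w0.toList.foldl (fun (acc : List String × PySem.Set Char) ch =>
      if acc.2.contains ch then acc
      else (acc.1 ++
              List.replicate
                ((PySem.List.min? (words.map (fun w => (PySem.Str.count w (String.ofList [ch]) : Int)))
                    (fun x => x)).getD 0).toNat (String.ofList [ch]),
            acc.2.add ch))
    ([], PySem.Set.empty)).1

-- ===== PRECONDITION & SPEC =====
-- A raises IndexError on words = [] (words[0]); B raises there too.
def Pre_commonChar (words : List String) : Prop := words ≠ []
instance (words : List String) : Decidable (Pre_commonChar words) := by unfold Pre_commonChar; infer_instance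
def pvWitness_commonChar : List String := ["bella", "label", "roller"]

def Spec_commonChar (words : List String) (out : List String) : Prop := out = commonChar_alt words
instance (words : List String) (out : List String) : Decidable (Spec_commonChar words out) := by unfold Spec_commonChar; infer_instance

-- ===== CLAIM (what is proved, stated in full; the proofs are below) =====
def Claim_equal_commonChar : Prop := ∀ (words : List String), Dom_commonChar words → Pre_commonChar words → Spec_commonChar words (commonChar words)

-- ===== LEMMAS AND PROOFS =====

-- counting a single-character substring is counting the character
theorem chars_count_go_single (c : Char) :
    ∀ (fuel : Nat) (l : List Char) (acc : Nat), l.length ≤ fuel →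
      PySem.Chars.count.go [c] fuel l acc = acc + l.count c := by
  intro fuel
  induction fuel with
  | zero =>
    intro l acc h
    have : l = [] := List.eq_nil_of_length_eq_zero (Nat.le_zero.mp h)
    subst this; simp [PySem.Chars.count.go]
  | succ n ih =>
    intro l acc h
    cases l with
    | nil => simp [PySem.Chars.count.go]
    | cons x t =>
      by_cases hx : c = x
      · subst hx
        simp only [PySem.Chars.count.go, List.isPrefixOf, BEq.rfl, Bool.true_and,
          if_pos]
        have hd : List.drop [c].length (c :: t) = t := rfl
        rw [hd, ih t (acc + 1) (by simp at h; omega), List.count_cons_self]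
        omega
      · have hbeq : ([c].isPrefixOf (x :: t)) = false := by
          simp [List.isPrefixOf, beq_eq_false_iff_ne, hx]
        simp only [PySem.Chars.count.go, hbeq, if_neg, Bool.false_eq_true, not_false_iff]
        rw [ih t acc (by simp at h; omega),
          List.count_cons_of_ne (fun he => hx he.symm)]

theorem count_single (s : String) (c : Char) :
    PySem.Str.count s (String.ofList [c]) = s.toList.count c := by
  have : PySem.Chars.count s.toList [c] = s.toList.count c := by
    unfold PySem.Chars.count
    simp only [List.isEmpty_cons, if_neg, Bool.false_eq_true, not_false_iff]
    rw [chars_count_go_single c s.toList.length s.toList 0 (le_refl _)]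
    omega
  simpa [PySem.Str.count] using this

-- A's first loop is the counter
theorem a_first_loop_eq_counter (cs : List Char) :
    cs.foldl (fun (d : PySem.Dict Char Int) c =>
        if d.contains c then d.insert c (d.getD c 0 + 1) else d.insert c 1) PySem.Dict.empty
      = PySem.Dict.counter cs := by
  rw [← PySem.Dict.foldl_insert_getD_add_one_eq_counter]
  apply List.foldl_ext
  intro d c _
  by_cases h : d.contains c = true
  · simp [h]
  · have h0 : d.getD c 0 = 0 := PySem.Dict.getD_of_not_contains d 0 (by simpa using h)
    simp [h, h0]

-- inner key loop: keys preserved, each key's value min-ed with f k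
theorem inner_loop (f : Char → Int) :
    ∀ (ks : List Char) (d : PySem.Dict Char Int), ks.Nodup → (∀ k ∈ ks, k ∈ d.keys) →
      (ks.foldl (fun (d' : PySem.Dict Char Int) k => d'.insert k (min (d'.getD k 0) (f k))) d).keys = d.keys ∧
      ∀ k', (ks.foldl (fun (d' : PySem.Dict Char Int) k => d'.insert k (min (d'.getD k 0) (f k))) d).getD k' 0
        = if k' ∈ ks then min (d.getD k' 0) (f k') else d.getD k' 0 := by
  intro ks
  induction ks with
  | nil => intro d _ _; simp
  | cons k t ih =>
    intro d hnd hmem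
    have hk : k ∈ d.keys := hmem k (by simp)
    have hcont : d.contains k = true := (PySem.Dict.contains_iff_mem_keys d k).mpr hk
    have hkeys₁ : (d.insert k (min (d.getD k 0) (f k))).keys = d.keys :=
      PySem.Dict.keys_insert_of_contains d _ hcont
    have hnd' : t.Nodup := (List.nodup_cons.mp hnd).2
    have hknot : k ∉ t := (List.nodup_cons.mp hnd).1
    have hmem' : ∀ k' ∈ t, k' ∈ (d.insert k (min (d.getD k 0) (f k))).keys := by
      intro k' hk'; rw [hkeys₁]; exact hmem k' (by simp [hk'])
    obtain ⟨hkeys, hval⟩ := ih (d.insert k (min (d.getD k 0) (f k))) hnd' hmem'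
    constructor
    · simp only [List.foldl_cons]; rw [hkeys, hkeys₁]
    · intro k'
      simp only [List.foldl_cons]
      rw [hval k']
      by_cases h1 : k' ∈ t
      · have hne : k' ≠ k := fun he => hknot (he ▸ h1)
        rw [PySem.Dict.getD_insert_of_ne d _ _ hne]
        simp [h1]
      · by_cases h2 : k' = k
        · subst h2
          rw [PySem.Dict.getD_insert_self]
          simp [h1, min_comm]
        · rw [PySem.Dict.getD_insert_of_ne d _ _ h2]
          simp [h1, h2]

-- outer loop over the remaining words
theorem outer_loop (cnt : String → Char → Int) :
    ∀ (ws : List String) (d : PySem.Dict Char Int), d.keys.Nodup →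
      (ws.foldl (fun d w => d.keys.foldl
          (fun (d' : PySem.Dict Char Int) k => d'.insert k (min (d'.getD k 0) (cnt w k))) d) d).keys = d.keys ∧
      ∀ k ∈ d.keys,
        (ws.foldl (fun d w => d.keys.foldl
            (fun (d' : PySem.Dict Char Int) k => d'.insert k (min (d'.getD k 0) (cnt w k))) d) d).getD k 0
          = ws.foldl (fun a w => min a (cnt w k)) (d.getD k 0) := by
  intro ws
  induction ws with
  | nil => intro d _; simp
  | cons w t ih =>
    intro d hnd
    obtain ⟨hkeys₁, hval₁⟩ := inner_loop (cnt w) d.keys d hnd (fun k hk => hk)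
    set d₁ := d.keys.foldl (fun (d' : PySem.Dict Char Int) k => d'.insert k (min (d'.getD k 0) (cnt w k))) d with hd₁
    have hnd₁ : d₁.keys.Nodup := by rw [hkeys₁]; exact hnd
    obtain ⟨hkeys, hval⟩ := ih d₁ hnd₁
    constructor
    · simp only [List.foldl_cons]; rw [← hd₁, hkeys, hkeys₁]
    · intro k hk
      simp only [List.foldl_cons]; rw [← hd₁, hval k (by rw [hkeys₁]; exact hk), hval₁ k]
      simp [hk]

-- B's fold emits the first occurrences not yet seen, in order
def dedupFrom (s : PySem.Set Char) : List Char → List Char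
  | [] => []
  | c :: cs => if s.contains c then dedupFrom s cs else c :: dedupFrom (s.add c) cs

theorem b_fold (g : Char → List String) :
    ∀ (cs : List Char) (r : List String) (s : PySem.Set Char),
      (cs.foldl (fun (acc : List String × PySem.Set Char) ch =>
          if acc.2.contains ch then acc else (acc.1 ++ g ch, acc.2.add ch)) (r, s)).1
        = r ++ (dedupFrom s cs).flatMap g := by
  intro cs
  induction cs with
  | nil => intro r s; simp [dedupFrom]
  | cons c t ih =>
    intro r s
    by_cases h : s.contains c = true
    · simp only [List.foldl_cons, h, if_pos, dedupFrom]
      rw [ih r s]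
    · simp only [List.foldl_cons, h, if_neg, dedupFrom, Bool.false_eq_true, not_false_iff]
      rw [ih (r ++ g c) (s.add c)]
      simp [List.flatMap_cons, List.append_assoc]

theorem dedupFrom_eq (cs : List Char) :
    ∀ (s : PySem.Set Char), s ++ dedupFrom s cs = List.foldl PySem.Set.add s cs := by
  induction cs with
  | nil => intro s; simp [dedupFrom]
  | cons c t ih =>
    intro s
    by_cases h : s.contains c = true
    · simp only [dedupFrom, h, if_pos, List.foldl_cons, PySem.Set.add, ih]
    · simp only [dedupFrom, h, if_neg, List.foldl_cons, PySem.Set.add, Bool.false_eq_true,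
        not_false_iff]
      rw [← ih (s ++ [c])]
      simp

theorem dedupFrom_empty (cs : List Char) :
    dedupFrom PySem.Set.empty cs = PySem.Set.ofList cs := by
  have := dedupFrom_eq cs PySem.Set.empty
  simpa [PySem.Set.empty, PySem.Set.ofList] using this

-- ===== VERDICT (by name: the statement is the Claim_ definition above) =====
theorem commonChar_spec : Claim_equal_commonChar := by
  unfold Claim_equal_commonChar
  intro words _ hpre
  unfold Spec_commonChar commonChar commonChar_alt
  obtain ⟨w0, rest, rfl⟩ : ∃ w0 rest, words = w0 :: rest := by
    cases words with
    | nil => exact absurd rfl hpre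
    | cons w0 rest => exact ⟨w0, rest, rfl⟩
  simp only [PySem.List.pyGetD_zero_cons]
  rw [a_first_loop_eq_counter]
  rw [PySem.List.foldl_pyRange_pyGetD (w0 :: rest) ""
      (fun d w => d.keys.foldl (fun (d' : PySem.Dict Char Int) k =>
        d'.insert k (min (d'.getD k 0) ((PySem.Str.count w (String.ofList [k]) : Int)))) d)
      (PySem.Dict.counter w0.toList) (by norm_num)]
  have hdrop : (w0 :: rest).drop (1 : Int).toNat = rest := by simp
  rw [hdrop]
  obtain ⟨hkeys, hval⟩ := outer_loop (fun w k => (PySem.Str.count w (String.ofList [k]) : Int)) rest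
      (PySem.Dict.counter w0.toList) (PySem.Dict.nodup_keys_counter w0.toList)
  set D := rest.foldl (fun d w => d.keys.foldl
      (fun (d' : PySem.Dict Char Int) k =>
        d'.insert k (min (d'.getD k 0) ((PySem.Str.count w (String.ofList [k]) : Int)))) d)
      (PySem.Dict.counter w0.toList) with hD
  rw [PySem.List.foldl_append_eq_flatMap, b_fold, dedupFrom_empty, List.nil_append, List.nil_append]
  rw [hkeys, PySem.Dict.keys_counter]
  apply List.flatMap_congr  -- pointwise over the dedup list
  intro k hk
  have hk' : k ∈ (PySem.Dict.counter w0.toList).keys := by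
    rw [PySem.Dict.keys_counter]; exact hk
  rw [hval k hk', PySem.Dict.getD_counter]
  congr 1
  simp only [List.map_cons]
  rw [PySem.List.min?_id_cons]
  simp only [Option.getD_some]
  rw [List.foldl_map, count_single]
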